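-- pv_equiv track=rewrite | github.com/DanielWap/MTO-Tasks | lab8/main.py | hexadecimalConversion
-- ===== SOURCE A (Python) =====
-- def hexadecimalConversion(string):
--     conv = ''
--     for char in string:
--         if 'a' <= char <= 'f':
--             char = chr(ord(char)+6)
--         if char == '0':
--             char = 'o'
--         conv += char
--     return conv
-- ===== SOURCE B (Python) =====
-- _TABLE = str.maketrans('abcdef0', 'ghijklo')
--
-- def hexadecimalConversion(string):
--     return string.translate(_TABLE)
-- ===== Notes on version B (the rewrite author's own statement) =====
-- stated objective: faster
-- what changed: Replaces the explicit per-character loop with its two in-place branches by a translation table built once with str.maketrans ('abcdef0' -> 'ghijklo') and applied in a single str.translate call.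
import Mathlib
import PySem

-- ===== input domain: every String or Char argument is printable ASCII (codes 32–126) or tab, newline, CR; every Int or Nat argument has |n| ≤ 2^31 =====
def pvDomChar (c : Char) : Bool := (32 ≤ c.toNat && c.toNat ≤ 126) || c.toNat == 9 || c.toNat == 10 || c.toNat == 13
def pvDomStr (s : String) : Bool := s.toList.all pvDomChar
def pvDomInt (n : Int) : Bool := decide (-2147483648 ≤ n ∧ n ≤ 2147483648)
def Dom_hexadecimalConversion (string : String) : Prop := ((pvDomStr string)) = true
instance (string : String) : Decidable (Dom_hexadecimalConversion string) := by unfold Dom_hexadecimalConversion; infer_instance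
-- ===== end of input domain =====

-- B builds the 7-entry translation table once and applies it in a single pass,
-- instead of A's per-character loop with two mutating branches.

-- ===== PORT A =====
def hexadecimalConversion (string : String) : String :=
  String.ofList (string.toList.foldl (fun conv char =>
    let char := if 'a' ≤ char ∧ char ≤ 'f' then Char.ofNat (char.toNat + 6) else char
    let char := if char = '0' then 'o' else char
    conv ++ [char]) [])

-- ===== PORT B =====
-- module-level _TABLE = str.maketrans('abcdef0', 'ghijklo')
def hexTable : List (Char × Char) := "abcdef0".toList.zip "ghijklo".toList

-- string.translate(_TABLE): one pass, each char replaced by its table entry (itself if absent)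
def hexadecimalConversion_alt (string : String) : String :=
  String.ofList (string.toList.map (fun c => ((hexTable.lookup c).getD c)))

-- ===== PRECONDITION & SPEC =====
def Spec_hexadecimalConversion (string : String) (out : String) : Prop := out = hexadecimalConversion_alt string
instance (string : String) (out : String) : Decidable (Spec_hexadecimalConversion string out) := by unfold Spec_hexadecimalConversion; infer_instance

-- ===== CLAIM (what is proved, stated in full; the proofs are below) =====
def Claim_equal_hexadecimalConversion : Prop := ∀ (string : String), Dom_hexadecimalConversion string → Spec_hexadecimalConversion string (hexadecimalConversion string)

-- ===== LEMMAS AND PROOFS =====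

-- A's per-character transformation agrees with B's table lookup on every character.
theorem step_eq (c : Char) :
    (let d := if 'a' ≤ c ∧ c ≤ 'f' then Char.ofNat (c.toNat + 6) else c
     if d = '0' then 'o' else d) = ((hexTable.lookup c).getD c) := by
  by_cases h1 : c = 'a'; · subst h1; decide
  by_cases h2 : c = 'b'; · subst h2; decide
  by_cases h3 : c = 'c'; · subst h3; decide
  by_cases h4 : c = 'd'; · subst h4; decide
  by_cases h5 : c = 'e'; · subst h5; decide
  by_cases h6 : c = 'f'; · subst h6; decide
  by_cases h7 : c = '0'; · subst h7; decide
  have key : ∀ d : Char, c.toNat = d.toNat → c = d := by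
    intro d h
    exact Char.ext (UInt32.toNat_inj.mp h)
  have hA : ¬ ('a' ≤ c ∧ c ≤ 'f') := by
    rintro ⟨hl, hr⟩
    rw [Char.le_def, UInt32.le_iff_toNat_le] at hl hr
    have hl' : 97 ≤ c.toNat := hl
    have hr' : c.toNat ≤ 102 := hr
    have e1 : c.toNat ≠ 97 := fun h => h1 (key 'a' (h.trans (by decide : (97:Nat) = 'a'.toNat)))
    have e2 : c.toNat ≠ 98 := fun h => h2 (key 'b' (h.trans (by decide : (98:Nat) = 'b'.toNat)))
    have e3 : c.toNat ≠ 99 := fun h => h3 (key 'c' (h.trans (by decide : (99:Nat) = 'c'.toNat)))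
    have e4 : c.toNat ≠ 100 := fun h => h4 (key 'd' (h.trans (by decide : (100:Nat) = 'd'.toNat)))
    have e5 : c.toNat ≠ 101 := fun h => h5 (key 'e' (h.trans (by decide : (101:Nat) = 'e'.toNat)))
    have e6 : c.toNat ≠ 102 := fun h => h6 (key 'f' (h.trans (by decide : (102:Nat) = 'f'.toNat)))
    omega
  simp [hA, h7, hexTable, List.lookup,
    beq_eq_false_iff_ne.mpr h1, beq_eq_false_iff_ne.mpr h2,
    beq_eq_false_iff_ne.mpr h3, beq_eq_false_iff_ne.mpr h4,
    beq_eq_false_iff_ne.mpr h5, beq_eq_false_iff_ne.mpr h6,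
    beq_eq_false_iff_ne.mpr h7]

-- ===== VERDICT (by name: the statement is the Claim_ definition above) =====
theorem hexadecimalConversion_spec : Claim_equal_hexadecimalConversion := by
  intro string _
  unfold Spec_hexadecimalConversion hexadecimalConversion hexadecimalConversion_alt
  rw [PySem.List.foldl_append_singleton_eq_map, List.nil_append]
  exact congrArg String.ofList (List.map_congr_left (fun c _ => step_eq c))
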